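-- pv_equiv track=rewrite | github.com/SkipPharaoh/python-challenge-problems-purple | day1/day1-solutions.py | phrase_finder
-- ===== SOURCE A (Python) =====
-- def phrase_finder(words, phrase):
--     for i in range(len(words)):
--         for j in range(i+1, len(words)):
--             if words[i] + " " + words[j] == phrase:
--                 return True
--             elif words[j] + " " + words[i] == phrase:
--                 return True
--     return False
-- ===== SOURCE B (Python) =====
-- def phrase_finder(words, phrase):
--     counts = {}
--     for w in words:
--         counts[w] = counts.get(w, 0) + 1
--     for k in range(len(phrase)):
--         if phrase[k] == " ":
--             left = phrase[:k]
--             right = phrase[k+1:]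
--             if left == right:
--                 if counts.get(left, 0) >= 2:
--                     return True
--             elif left in counts and right in counts:
--                 return True
--     return False
-- ===== Notes on version B (the rewrite author's own statement) =====
-- stated objective: faster
-- what changed: Replaced A's O(n^2) scan over all pairs of words by a word-count dictionary built in one pass plus a single pass over the space positions of the phrase, checking each split for two available words (duplicates via the count).
import Mathlib
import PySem

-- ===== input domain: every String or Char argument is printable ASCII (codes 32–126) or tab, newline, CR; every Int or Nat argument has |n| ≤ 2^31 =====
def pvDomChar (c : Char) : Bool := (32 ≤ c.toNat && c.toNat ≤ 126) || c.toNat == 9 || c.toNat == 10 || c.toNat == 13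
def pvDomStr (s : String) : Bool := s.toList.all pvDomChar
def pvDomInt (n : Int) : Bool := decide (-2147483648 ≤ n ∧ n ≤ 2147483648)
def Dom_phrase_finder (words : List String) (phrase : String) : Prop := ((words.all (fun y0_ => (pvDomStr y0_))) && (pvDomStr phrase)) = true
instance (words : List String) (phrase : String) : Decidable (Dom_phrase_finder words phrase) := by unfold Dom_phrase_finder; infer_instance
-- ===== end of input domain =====

-- B replaces A's quadratic scan over all pairs of words by a word-count dictionary
-- plus one pass over the space positions of the phrase (objective: faster).

-- ===== PORT A =====
-- Python string concatenation/equality is modelled exactly on the character lists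
-- (s + " " + t == phrase  ↦  s.toList ++ ' ' :: t.toList == phrase.toList).
def phrase_finder (words : List String) (phrase : String) : Bool :=
  (PySem.List.pyRange 0 (PySem.List.len words) 1).any (fun i =>
    (PySem.List.pyRange (i + 1) (PySem.List.len words) 1).any (fun j =>
      let wi := (PySem.List.pyGetD words i "").toList
      let wj := (PySem.List.pyGetD words j "").toList
      (wi ++ ' ' :: wj == phrase.toList) || (wj ++ ' ' :: wi == phrase.toList)))

-- ===== PORT B =====
def phrase_finder_alt (words : List String) (phrase : String) : Bool :=
  let counts := words.foldl (fun d w => d.insert w (d.getD w 0 + 1))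
      (PySem.Dict.empty : PySem.Dict String Int)
  let cs := phrase.toList
  (PySem.List.pyRange 0 (PySem.Str.len phrase) 1).any (fun k =>
    if PySem.List.pyGet? cs k == some ' ' then
      let left := PySem.List.slice cs none (some k)
      let right := PySem.List.slice cs (some (k + 1)) none
      if left == right then
        decide (2 ≤ counts.getD (String.ofList left) 0)
      else
        counts.contains (String.ofList left) && counts.contains (String.ofList right)
    else false)

-- ===== PRECONDITION & SPEC =====
def Spec_phrase_finder (words : List String) (phrase : String) (out : Bool) : Prop := out = phrase_finder_alt words phrase
instance (words : List String) (phrase : String) (out : Bool) : Decidable (Spec_phrase_finder words phrase out) := by unfold Spec_phrase_finder; infer_instance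

-- ===== CLAIM (what is proved, stated in full; the proofs are below) =====
def Claim_equal_phrase_finder : Prop := ∀ (words : List String) (phrase : String), Dom_phrase_finder words phrase → Spec_phrase_finder words phrase (phrase_finder words phrase)

-- ===== LEMMAS AND PROOFS =====

-- "some pair of distinct indices, joined by a space, gives the phrase"
def ExPair (words : List String) (cs : List Char) : Prop :=
  ∃ (i j : Nat) (hi : i < words.length) (hj : j < words.length),
    i ≠ j ∧ (words[i]).toList ++ ' ' :: (words[j]).toList = cs

-- "some space position of the phrase splits it into two available words"
def ExSplit (words : List String) (cs : List Char) : Prop :=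
  ∃ k : Nat, k < cs.length ∧ cs[k]? = some ' ' ∧
    ((cs.take k = cs.drop (k + 1) ∧ 2 ≤ words.count (String.ofList (cs.take k))) ∨
     (cs.take k ≠ cs.drop (k + 1) ∧ String.ofList (cs.take k) ∈ words ∧
       String.ofList (cs.drop (k + 1)) ∈ words))

theorem count_two_of_pair {words : List String} {i j : Nat} (hi : i < words.length)
    (hj : j < words.length) (hne : i ≠ j) (hv : words[i] = words[j]) :
    2 ≤ words.count words[i] := by
  rw [← List.duplicate_iff_two_le_count]
  rw [List.duplicate_iff_exists_distinct_get]
  rcases Nat.lt_or_ge i j with h | h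
  · exact ⟨⟨i, hi⟩, ⟨j, hj⟩, h, by simp, by simp [hv]⟩
  · exact ⟨⟨j, hj⟩, ⟨i, hi⟩, by exact lt_of_le_of_ne h (fun hh => hne (congrArg Fin.val hh).symm), by simp [hv], by simp⟩

theorem A_iff (words : List String) (phrase : String) :
    phrase_finder words phrase = true ↔ ExPair words phrase.toList := by
  simp only [phrase_finder, List.any_eq_true, PySem.List.mem_pyRange_one, PySem.List.len_eq]
  constructor
  · rintro ⟨i, ⟨hi0, hin⟩, j, ⟨hij, hjn⟩, hor⟩
    have hj0 : (0:Int) ≤ j := by omega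
    rw [PySem.List.pyGetD_eq_getElem words "" hi0 hin,
        PySem.List.pyGetD_eq_getElem words "" hj0 hjn] at hor
    simp only [Bool.or_eq_true, beq_iff_eq] at hor
    have hi' : i.toNat < words.length := by omega
    have hj' : j.toNat < words.length := by omega
    have hne : i.toNat ≠ j.toNat := by omega
    rcases hor with h | h
    · exact ⟨i.toNat, j.toNat, hi', hj', hne, h⟩
    · exact ⟨j.toNat, i.toNat, hj', hi', hne.symm, h⟩
  · rintro ⟨i, j, hi, hj, hne, heq⟩
    rcases Nat.lt_or_ge i j with h | h
    · refine ⟨(i:Int), ⟨by omega, by omega⟩, (j:Int), ⟨by omega, by omega⟩, ?_⟩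
      rw [PySem.List.pyGetD_eq_getElem words "" (by omega) (by omega),
          PySem.List.pyGetD_eq_getElem words "" (by omega) (by omega)]
      simp only [Int.toNat_natCast, Bool.or_eq_true, beq_iff_eq]
      exact Or.inl heq
    · have h' : j < i := by omega
      refine ⟨(j:Int), ⟨by omega, by omega⟩, (i:Int), ⟨by omega, by omega⟩, ?_⟩
      rw [PySem.List.pyGetD_eq_getElem words "" (by omega) (by omega),
          PySem.List.pyGetD_eq_getElem words "" (by omega) (by omega)]
      simp only [Int.toNat_natCast, Bool.or_eq_true, beq_iff_eq]
      exact Or.inr heq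

theorem B_iff (words : List String) (phrase : String) :
    phrase_finder_alt words phrase = true ↔ ExSplit words phrase.toList := by
  simp only [phrase_finder_alt, List.any_eq_true, PySem.List.mem_pyRange_one, PySem.Str.len_eq,
    PySem.Dict.foldl_insert_getD_add_one_eq_counter]
  constructor
  · rintro ⟨k, ⟨hk0, hkn⟩, hcond⟩
    rw [PySem.List.pyGet?_of_nonneg _ hk0,
        PySem.List.slice_to _ hk0, PySem.List.slice_from _ (by omega)] at hcond
    have hkk : ((k:Int) + 1).toNat = k.toNat + 1 := by omega
    rw [hkk] at hcond
    split at hcond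
    · rename_i hsp
      simp only [beq_iff_eq] at hsp
      refine ⟨k.toNat, by omega, hsp, ?_⟩
      split at hcond
      · rename_i heq
        simp only [beq_iff_eq] at heq
        simp only [decide_eq_true_eq, PySem.Dict.getD_counter] at hcond
        exact Or.inl ⟨heq, by exact_mod_cast hcond⟩
      · rename_i hne
        simp only [beq_iff_eq] at hne
        simp only [Bool.and_eq_true, PySem.Dict.contains_counter, List.contains_iff_mem] at hcond
        exact Or.inr ⟨hne, hcond.1, hcond.2⟩
    · exact absurd hcond (by simp)
  · rintro ⟨k, hk, hsp, hrest⟩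
    refine ⟨(k:Int), ⟨by omega, by omega⟩, ?_⟩
    rw [PySem.List.pyGet?_of_nonneg _ (by omega),
        PySem.List.slice_to _ (by omega), PySem.List.slice_from _ (by omega)]
    have hkk : ((k:Int) + 1).toNat = k + 1 := by omega
    rw [hkk]
    simp only [Int.toNat_natCast]
    rw [if_pos (by simp [hsp])]
    rcases hrest with ⟨heq, hcnt⟩ | ⟨hne, h1, h2⟩
    · rw [if_pos (by simp [heq])]
      simp only [decide_eq_true_eq, PySem.Dict.getD_counter]
      exact_mod_cast hcnt
    · rw [if_neg (by simp [hne])]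
      simp only [Bool.and_eq_true, PySem.Dict.contains_counter, List.contains_iff_mem]
      exact ⟨h1, h2⟩

theorem pair_iff_split (words : List String) (cs : List Char) :
    ExPair words cs ↔ ExSplit words cs := by
  constructor
  · rintro ⟨i, j, hi, hj, hne, heq⟩
    subst heq
    set wi := (words[i]).toList with hwi
    set wj := (words[j]).toList with hwj
    have htake : (wi ++ ' ' :: wj).take wi.length = wi := List.take_left
    have hdrop : (wi ++ ' ' :: wj).drop (wi.length + 1) = wj := by
      have : wi ++ ' ' :: wj = (wi ++ [' ']) ++ wj := by simp
      rw [this]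
      rw [show wi.length + 1 = (wi ++ [' ']).length by simp]
      exact List.drop_left
    refine ⟨wi.length, by simp, ?_, ?_⟩
    · rw [List.getElem?_append_right (Nat.le_refl _)]
      simp
    · rw [htake, hdrop]
      by_cases hw : wi = wj
      · refine Or.inl ⟨hw, ?_⟩
        have : String.ofList wi = words[i] := by rw [hwi, String.ofList_toList]
        rw [this]
        apply count_two_of_pair hi hj hne
        have := congrArg String.ofList hw
        rwa [hwi, hwj, String.ofList_toList, String.ofList_toList] at this
      · refine Or.inr ⟨hw, ?_, ?_⟩
        · rw [hwi, String.ofList_toList]; exact List.getElem_mem hi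
        · rw [hwj, String.ofList_toList]; exact List.getElem_mem hj
  · rintro ⟨k, hk, hsp, hrest⟩
    have hget : cs[k] = ' ' := by
      have := List.getElem?_eq_some_iff.mp hsp
      rcases this with ⟨h, hv⟩; exact hv
    have hcs : cs = cs.take k ++ ' ' :: cs.drop (k + 1) := by
      conv_lhs => rw [← List.take_append_drop k cs]
      congr 1
      rw [← List.getElem_cons_drop hk, hget]
    rcases hrest with ⟨heq, hcnt⟩ | ⟨hne, h1, h2⟩
    · have hd := List.duplicate_iff_exists_distinct_get.mp
        (List.duplicate_iff_two_le_count.mpr hcnt)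
      rcases hd with ⟨n, m, hnm, hvn, hvm⟩
      refine ⟨n.1, m.1, n.2, m.2, Nat.ne_of_lt hnm, ?_⟩
      have hn : (words[n.1]).toList = cs.take k := by
        simp only [← List.get_eq_getElem, ← hvn, String.toList_ofList]
      have hm : (words[m.1]).toList = cs.take k := by
        simp only [← List.get_eq_getElem, ← hvm, String.toList_ofList]
      rw [hn, hm]
      conv_rhs => rw [hcs]
      rw [← heq]
    · rcases List.mem_iff_getElem.mp h1 with ⟨i, hi, hvi⟩
      rcases List.mem_iff_getElem.mp h2 with ⟨j, hj, hvj⟩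
      have hne' : i ≠ j := by
        intro h
        apply hne
        have : words[i] = words[j] := by subst h; rfl
        rw [hvi, hvj] at this
        have := congrArg String.toList this
        rwa [String.toList_ofList, String.toList_ofList] at this
      refine ⟨i, j, hi, hj, hne', ?_⟩
      rw [hvi, hvj, String.toList_ofList, String.toList_ofList]
      exact hcs.symm

-- ===== VERDICT (by name: the statement is the Claim_ definition above) =====
theorem phrase_finder_spec : Claim_equal_phrase_finder := by
  intro words phrase _
  unfold Spec_phrase_finder
  have h := (A_iff words phrase).trans ((pair_iff_split words phrase.toList).trans (B_iff words phrase).symm)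
  cases hA : phrase_finder words phrase
  · cases hB : phrase_finder_alt words phrase
    · rfl
    · exact absurd (h.mpr hB) (by simp [hA])
  · exact (h.mp hA).symm
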